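-- pv_equiv track=rewrite | github.com/CharlesAverill/terrasim | assets/sprites/gen_sprites_file.py | build_parent_groups
-- ===== SOURCE A (Python) =====
-- from collections import defaultdict
--
-- def build_parent_groups(groups: dict) -> dict:
--     # Merge children into parent groups recursively
--     merged = defaultdict(list)
--     for path_str, idents in groups.items():
--         parts = path_str.split("_")
--         for i in range(1, len(parts)):
--             parent = "_".join(parts[:i])
--             merged[parent].extend(idents)
--         merged[path_str].extend(idents)
--     # Deduplicate
--     for key in merged:
--         merged[key] = list(dict.fromkeys(merged[key]))
--     return merged
-- ===== SOURCE B (Python) =====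
-- from collections import defaultdict
--
-- def build_parent_groups(groups: dict) -> dict:
--     # Gather instead of scatter: first enumerate the output keys in first-seen
--     # order, then compute each key's value independently by scanning groups for
--     # the paths lying in that key's subtree (path == key or path starts with
--     # key + "_"), deduplicating on the fly.
--     keys = []
--     for path_str in groups:
--         parts = path_str.split("_")
--         for i in range(1, len(parts) + 1):
--             k = "_".join(parts[:i])
--             if k not in keys:
--                 keys.append(k)
--     result = defaultdict(list)
--     for k in keys:
--         vals = []
--         for path_str, idents in groups.items():
--             if path_str == k or path_str.startswith(k + "_"):
--                 for ident in idents: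
--                     if ident not in vals:
--                         vals.append(ident)
--         result[k] = vals
--     return result
-- ===== Notes on version B (the rewrite author's own statement) =====
-- stated objective: alternative
-- what changed: B inverts A's scatter-accumulate design: instead of pushing each group's idents into a dict of growing lists and deduplicating in a second pass, B first enumerates the output keys in first-seen order and then computes each key's value independently by a gather scan over groups for the paths in that key's subtree (path == key or path.startswith(key + '_')), deduplicating on the fly.
import Mathlib
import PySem

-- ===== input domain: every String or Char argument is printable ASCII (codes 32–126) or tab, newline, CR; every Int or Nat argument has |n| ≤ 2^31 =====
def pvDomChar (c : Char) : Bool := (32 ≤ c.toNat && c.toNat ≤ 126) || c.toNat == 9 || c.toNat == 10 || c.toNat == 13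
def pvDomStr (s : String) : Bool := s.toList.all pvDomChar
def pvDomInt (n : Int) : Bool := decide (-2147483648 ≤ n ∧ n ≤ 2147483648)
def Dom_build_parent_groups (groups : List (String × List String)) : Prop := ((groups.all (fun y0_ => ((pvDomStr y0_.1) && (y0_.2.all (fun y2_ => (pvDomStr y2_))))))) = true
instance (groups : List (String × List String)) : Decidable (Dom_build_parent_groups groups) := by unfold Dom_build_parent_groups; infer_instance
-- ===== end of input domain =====

-- B inverts A's scatter-accumulate: it enumerates the output keys first, then gathers each key's
-- value by an independent subtree scan (path == key or path startswith key+"_") with on-the-fly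
-- dedup, instead of A's dict of accumulated lists plus a second dedup pass (objective: alternative).


-- ===== PORT A =====
-- path_str.split("_"): the separator is the nonempty literal "_", so PySem.Str.split? is always
-- `some`; `.getD []` only discharges the Option (Python raises solely on an empty separator).
-- merged[k].extend(idents) on a defaultdict(list) is insert k (getD k [] ++ idents).
def build_parent_groups (groups : List (String × List String)) : List (String × List String) :=
  let merged : PySem.Dict String (List String) :=
    groups.foldl
      (fun merged p =>
        let parts := (PySem.Str.split? p.1 "_").getD []
        let merged :=
          (PySem.List.pyRange 1 (parts.length : Int) 1).foldl
            (fun merged i =>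
              let parent := PySem.Str.join "_" (PySem.List.slice parts none (some i))
              merged.insert parent (merged.getD parent [] ++ p.2))
            merged
        merged.insert p.1 (merged.getD p.1 [] ++ p.2))
      PySem.Dict.empty
  -- for key in merged: merged[key] = list(dict.fromkeys(merged[key]))
  let merged :=
    merged.keys.foldl
      (fun m key => m.insert key (PySem.List.dedup (m.getD key []))) merged
  merged.items

-- ===== PORT B =====
-- B enumerates the keys (first-seen order, `k not in keys` on the list), then for each key
-- gathers the idents of every group whose path lies in the key's subtree, skipping seen idents.
-- The final defaultdict(list) is filled with result[k] = vals in key order: the items map.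
def build_parent_groups_alt (groups : List (String × List String)) : List (String × List String) :=
  let keys : List String :=
    groups.foldl
      (fun keys p =>
        let parts := (PySem.Str.split? p.1 "_").getD []
        (PySem.List.pyRange 1 ((parts.length : Int) + 1) 1).foldl
          (fun keys i =>
            let k := PySem.Str.join "_" (PySem.List.slice parts none (some i))
            if keys.contains k then keys else keys ++ [k])
          keys)
      []
  keys.map (fun k =>
    (k,
      groups.foldl
        (fun vals p =>
          if p.1 == k || PySem.Str.startswith p.1 (k ++ "_") then
            p.2.foldl (fun vals ident => if vals.contains ident then vals else vals ++ [ident]) vals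
          else vals)
        []))

-- ===== PRECONDITION & SPEC =====
def Spec_build_parent_groups (groups : List (String × List String)) (out : List (String × List String)) : Prop := out = build_parent_groups_alt groups
instance (groups : List (String × List String)) (out : List (String × List String)) : Decidable (Spec_build_parent_groups groups out) := by unfold Spec_build_parent_groups; infer_instance

-- ===== CLAIM (what is proved, stated in full; the proofs are below) =====
def Claim_equal_build_parent_groups : Prop := ∀ (groups : List (String × List String)), Dom_build_parent_groups groups → Spec_build_parent_groups groups (build_parent_groups groups)

-- ===== LEMMAS AND PROOFS =====

-- join/split roundtrip (needed to rebuild the full path from its parts)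
lemma pv_join_append_singleton (sep : List Char) (acc : List (List Char)) (z : List Char) :
    PySem.Chars.join sep (acc ++ [z])
      = PySem.Chars.join sep acc ++ (if acc = [] then [] else sep) ++ z := by
  induction acc with
  | nil => simp [PySem.Chars.join_singleton, PySem.Chars.join_nil]
  | cons a rest ih =>
    cases rest with
    | nil => simp [PySem.Chars.join_singleton, PySem.Chars.join_cons_cons]
    | cons b r =>
      simp only [List.cons_append] at ih ⊢
      rw [PySem.Chars.join_cons_cons, ih, PySem.Chars.join_cons_cons]
      simp

lemma pv_join_go (sep : List Char) (hsep : sep ≠ []) :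
    ∀ (fuel : Nat) (l cur : List Char) (acc : List (List Char)), l.length ≤ fuel →
      PySem.Chars.join sep (PySem.Chars.splitOn.go sep fuel l cur acc)
        = PySem.Chars.join sep acc.reverse ++ (if acc = [] then [] else sep) ++ cur.reverse ++ l := by
  intro fuel
  induction fuel with
  | zero =>
    intro l cur acc hl
    have : l = [] := by cases l <;> simp_all
    subst this
    show PySem.Chars.join sep (((cur.reverse ++ []) :: acc).reverse) = _
    rw [List.reverse_cons, pv_join_append_singleton]
    simp [List.reverse_eq_nil_iff]
  | succ fuel ih =>
    intro l cur acc hl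
    cases l with
    | nil =>
      show PySem.Chars.join sep ((cur.reverse :: acc).reverse) = _
      rw [List.reverse_cons, pv_join_append_singleton]
      simp [List.reverse_eq_nil_iff]
    | cons c rest =>
      show PySem.Chars.join sep
        (if sep.isPrefixOf (c :: rest) = true then
          PySem.Chars.splitOn.go sep fuel (List.drop sep.length (c :: rest)) [] (cur.reverse :: acc)
         else PySem.Chars.splitOn.go sep fuel rest (c :: cur) acc) = _
      by_cases hp : sep.isPrefixOf (c :: rest) = true
      · rw [if_pos hp]
        have hs1 : 1 ≤ sep.length := by cases sep <;> simp_all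
        rw [ih _ _ _ (by simp only [List.length_drop, List.length_cons] at *; omega)]
        obtain ⟨t, ht⟩ := List.isPrefixOf_iff_prefix.mp hp
        rw [List.reverse_cons, pv_join_append_singleton]
        have hdrop : List.drop sep.length (c :: rest) = t := by
          rw [← ht, List.drop_left]
        rw [hdrop, ← ht]
        simp [List.reverse_eq_nil_iff]
      · rw [if_neg hp, ih _ _ _ (by simpa using Nat.le_of_succ_le_succ (by simpa using hl))]
        simp

lemma pv_join_splitOn (cs sep : List Char) (hsep : sep ≠ []) :
    PySem.Chars.join sep (PySem.Chars.splitOn cs sep) = cs := by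
  unfold PySem.Chars.splitOn
  rw [pv_join_go sep hsep _ _ _ _ (Nat.le_succ _)]
  simp [PySem.Chars.join_nil]

lemma pv_splitOn_go_ne_nil (sep : List Char) :
    ∀ (fuel : Nat) (l cur : List Char) (acc : List (List Char)),
      PySem.Chars.splitOn.go sep fuel l cur acc ≠ [] := by
  intro fuel
  induction fuel with
  | zero => intro l cur acc; cases l <;> simp [PySem.Chars.splitOn.go]
  | succ fuel ih =>
    intro l cur acc
    cases l with
    | nil => simp [PySem.Chars.splitOn.go]
    | cons c rest =>
      show (if sep.isPrefixOf (c :: rest) = true then _ else _) ≠ []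
      by_cases hp : sep.isPrefixOf (c :: rest) = true
      · rw [if_pos hp]; exact ih _ _ _
      · rw [if_neg hp]; exact ih _ _ _

-- the pieces of a split on '_' never contain '_'
lemma pv_sepfree_go :
    ∀ (fuel : Nat) (l cur : List Char) (acc : List (List Char)), l.length ≤ fuel →
      '_' ∉ cur → (∀ x ∈ acc, '_' ∉ x) →
      ∀ x ∈ PySem.Chars.splitOn.go ['_'] fuel l cur acc, '_' ∉ x := by
  intro fuel
  induction fuel with
  | zero =>
    intro l cur acc hl hcur hacc
    have : l = [] := by cases l <;> simp_all
    subst this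
    intro x hx
    show ¬ _
    have : x ∈ ((cur.reverse ++ []) :: acc).reverse := hx
    simp at this
    rcases this with h | h
    · exact fun hc => hacc x h hc
    · subst h; simpa using hcur
  | succ fuel ih =>
    intro l cur acc hl hcur hacc
    cases l with
    | nil =>
      intro x hx
      have : x ∈ (cur.reverse :: acc).reverse := hx
      simp at this
      rcases this with h | h
      · exact hacc x h
      · subst h; simpa using hcur
    | cons c rest =>
      intro x hx
      have hx' : x ∈ (if ['_'].isPrefixOf (c :: rest) = true then
          PySem.Chars.splitOn.go ['_'] fuel (List.drop 1 (c :: rest)) [] (cur.reverse :: acc)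
        else PySem.Chars.splitOn.go ['_'] fuel rest (c :: cur) acc) := hx
      by_cases hp : ['_'].isPrefixOf (c :: rest) = true
      · rw [if_pos hp] at hx'
        refine ih _ _ _ (by simp at hl ⊢; omega) (by simp) ?_ x hx'
        intro y hy
        simp at hy
        rcases hy with h | h
        · subst h; simpa using hcur
        · exact hacc y h
      · rw [if_neg hp] at hx'
        have hc : c ≠ '_' := by
          intro h; subst h; simp [List.isPrefixOf] at hp
        refine ih _ _ _ (by simpa using Nat.le_of_succ_le_succ (by simpa using hl)) ?_ hacc x hx'
        simp [hcur]
        exact fun h => hc h.symm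

-- join of two nonempty blocks
lemma pvC_join_append (xs ys : List (List Char)) (hx : xs ≠ []) (hy : ys ≠ []) :
    PySem.Chars.join ['_'] (xs ++ ys)
      = PySem.Chars.join ['_'] xs ++ '_' :: PySem.Chars.join ['_'] ys := by
  induction xs with
  | nil => exact absurd rfl hx
  | cons a xs' ih =>
    cases xs' with
    | nil =>
      cases ys with
      | nil => exact absurd rfl hy
      | cons b r =>
        rw [List.singleton_append, PySem.Chars.join_cons_cons, PySem.Chars.join_singleton]
        simp
    | cons a2 xs'' =>
      rw [show (a :: a2 :: xs'') ++ ys = a :: a2 :: (xs'' ++ ys) by simp,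
        PySem.Chars.join_cons_cons ['_'] a a2 (xs'' ++ ys),
        show a2 :: (xs'' ++ ys) = (a2 :: xs'') ++ ys by simp,
        ih (by simp), PySem.Chars.join_cons_cons]
      simp

-- a strict prefix ending at an underscore is the join of an initial run of parts
lemma pvC_split_prefix :
    ∀ (ps : List (List Char)), ps ≠ [] → (∀ q ∈ ps, '_' ∉ q) →
      ∀ u t, u ++ '_' :: t = PySem.Chars.join ['_'] ps →
      ∃ j, 1 ≤ j ∧ j ≤ ps.length ∧ u = PySem.Chars.join ['_'] (ps.take j) := by
  intro ps
  induction ps with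
  | nil => intro h; exact absurd rfl h
  | cons a rest ih =>
    intro _ hfree u t hu
    cases rest with
    | nil =>
      rw [PySem.Chars.join_singleton] at hu
      exact absurd (by rw [← hu]; simp) (hfree a (by simp))
    | cons b r =>
      rw [PySem.Chars.join_cons_cons] at hu
      have h1 : u <+: a ++ ['_'] ++ PySem.Chars.join ['_'] (b :: r) := ⟨'_' :: t, by rw [← hu]⟩
      have h2 : a <+: a ++ ['_'] ++ PySem.Chars.join ['_'] (b :: r) :=
        ⟨['_'] ++ PySem.Chars.join ['_'] (b :: r), by simp⟩
      rcases List.prefix_or_prefix_of_prefix h1 h2 with h | h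
      · obtain ⟨v, hv⟩ := h
        cases v with
        | nil =>
          refine ⟨1, le_refl _, by simp, ?_⟩
          simp only [List.take_succ_cons, List.take_zero, PySem.Chars.join_singleton]
          rw [← hv]; simp
        | cons c v' =>
          exfalso
          have htail : '_' :: t = (c :: v') ++ ['_'] ++ PySem.Chars.join ['_'] (b :: r) := by
            apply List.append_cancel_left (as := u)
            rw [hu, ← hv]; simp
          have hc : c = '_' := by
            have h3 := congrArg (fun l => l.head?) htail
            simp at h3
            exact h3.symm
          exact hfree a (by simp) (by rw [← hv, hc]; simp)
      · obtain ⟨v, hv⟩ := h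
        have htail : v ++ '_' :: t = '_' :: PySem.Chars.join ['_'] (b :: r) := by
          apply List.append_cancel_left (as := a)
          rw [← List.append_assoc, hv, hu]; simp
        cases v with
        | nil =>
          refine ⟨1, le_refl _, by simp, ?_⟩
          rw [← hv]; simp [PySem.Chars.join_singleton]
        | cons c v' =>
          have hc : c = '_' := by
            have h3 := congrArg (fun l => l.head?) htail
            simp at h3
            exact h3
          subst hc
          have hv' : v' ++ '_' :: t = PySem.Chars.join ['_'] (b :: r) := by
            simpa using htail
          obtain ⟨j, hj1, hj2, hj3⟩ := ih (by simp) (fun q hq => hfree q (by simp [hq])) v' t hv'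
          refine ⟨j + 1, by omega, by simpa using hj2, ?_⟩
          have hne : (b :: r).take j ≠ [] := by
            cases j with
            | zero => omega
            | succ j' => simp
          rw [List.take_succ_cons,
            show a :: (b :: r).take j = [a] ++ (b :: r).take j from rfl,
            pvC_join_append [a] _ (by simp) hne, PySem.Chars.join_singleton, ← hv, hj3]

def pvMatch (k : String) (p : String × List String) : Bool :=
  p.1 == k || PySem.Str.startswith p.1 (k ++ "_")

def pvParts (s : String) : List String := (PySem.Str.split? s "_").getD []

def pvPrefixes (s : String) : List String :=
  (List.range (pvParts s).length).map (fun j => PySem.Str.join "_" ((pvParts s).take (j + 1)))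

lemma pv_parts_toList (s : String) :
    (pvParts s).map String.toList = PySem.Chars.splitOn s.toList ['_'] := by
  simp [pvParts, PySem.Str.split?, PySem.Chars.split?, List.map_map, Function.comp_def]

lemma pv_parts_ne (s : String) : pvParts s ≠ [] := by
  intro h
  have := pv_parts_toList s
  rw [h] at this
  exact pv_splitOn_go_ne_nil _ _ _ _ _ this.symm

lemma pv_parts_free (s : String) : ∀ q ∈ (pvParts s).map String.toList, '_' ∉ q := by
  rw [pv_parts_toList]
  exact pv_sepfree_go _ _ _ _ (Nat.le_succ _) (by simp) (by simp)

lemma pv_joinC_parts (s : String) :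
    PySem.Chars.join ['_'] ((pvParts s).map String.toList) = s.toList := by
  rw [pv_parts_toList]
  exact pv_join_splitOn _ _ (by simp)

lemma pv_join_parts (s : String) : PySem.Str.join "_" (pvParts s) = s := by
  apply String.toList_inj.mp
  rw [PySem.Str.toList_join]
  simpa using pv_joinC_parts s

lemma pv_joinC_take (s : String) (j : Nat) :
    (PySem.Str.join "_" ((pvParts s).take j)).toList
      = PySem.Chars.join ['_'] (((pvParts s).map String.toList).take j) := by
  rw [PySem.Str.toList_join, List.map_take]
  simp

lemma pv_mem_prefixes_iff (s k : String) :
    k ∈ pvPrefixes s ↔ (s = k ∨ (k.toList ++ ['_']) <+: s.toList) := by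
  have hne : (pvParts s).length ≠ 0 := by
    simpa [List.length_eq_zero_iff] using pv_parts_ne s
  constructor
  · rintro hk
    simp only [pvPrefixes, List.mem_map, List.mem_range] at hk
    obtain ⟨j, hj, rfl⟩ := hk
    by_cases hlast : j + 1 = (pvParts s).length
    · left
      rw [hlast, List.take_length, pv_join_parts]
    · right
      have hjlt : j + 1 < (pvParts s).length := by omega
      have hsplit : PySem.Chars.join ['_'] ((pvParts s).map String.toList)
          = PySem.Chars.join ['_'] (((pvParts s).map String.toList).take (j + 1))
            ++ '_' :: PySem.Chars.join ['_'] (((pvParts s).map String.toList).drop (j + 1)) := by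
        rw [← pvC_join_append _ _
          (by simp [List.take_eq_nil_iff, pv_parts_ne s])
          (by simp [List.drop_eq_nil_iff]; omega),
          List.take_append_drop]
      refine ⟨PySem.Chars.join ['_'] (((pvParts s).map String.toList).drop (j + 1)), ?_⟩
      rw [pv_joinC_take, ← pv_joinC_parts s, hsplit]
      simp
  · rintro (rfl | ⟨t, ht⟩)
    · simp only [pvPrefixes, List.mem_map, List.mem_range]
      exact ⟨(pvParts s).length - 1, by omega,
        by rw [Nat.sub_add_cancel (by omega), List.take_length, pv_join_parts]⟩
    · have ht' : k.toList ++ '_' :: t = PySem.Chars.join ['_'] ((pvParts s).map String.toList) := by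
        rw [pv_joinC_parts, ← ht]; simp
      obtain ⟨j, hj1, hj2, hj3⟩ :=
        pvC_split_prefix _ (by simpa using pv_parts_ne s) (pv_parts_free s) _ _ ht'
      simp only [pvPrefixes, List.mem_map, List.mem_range]
      refine ⟨j - 1, by simp at hj2; omega, ?_⟩
      apply String.toList_inj.mp
      rw [pv_joinC_take, Nat.sub_add_cancel hj1, hj3]

lemma pv_match_iff (k : String) (p : String × List String) :
    pvMatch k p = true ↔ k ∈ pvPrefixes p.1 := by
  rw [pv_mem_prefixes_iff]
  simp only [pvMatch, Bool.or_eq_true, beq_iff_eq, PySem.Str.startswith_eq,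
    PySem.Chars.startswith_iff, String.toList_append]
  constructor
  · rintro (h | h)
    · exact Or.inl h
    · exact Or.inr (by simpa using h)
  · rintro (h | h)
    · exact Or.inl h
    · exact Or.inr (by simpa using h)

-- the prefixes of one path are pairwise distinct (their lengths strictly grow)
lemma pv_prefixes_nodup (s : String) : (pvPrefixes s).Nodup := by
  have key : ∀ j2, j2 < (pvParts s).length → ∀ j1, j1 < j2 →
      (PySem.Chars.join ['_'] (((pvParts s).map String.toList).take (j1 + 1))).length
        < (PySem.Chars.join ['_'] (((pvParts s).map String.toList).take (j2 + 1))).length := by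
    intro j2
    induction j2 with
    | zero => omega
    | succ j2' ih =>
      intro hj2 j1 hj1
      have hstep :
          (PySem.Chars.join ['_'] (((pvParts s).map String.toList).take (j2' + 1))).length
            < (PySem.Chars.join ['_'] (((pvParts s).map String.toList).take (j2' + 2))).length := by
        have hlt : j2' + 1 < ((pvParts s).map String.toList).length := by simpa using hj2
        rw [List.take_succ_eq_append_getElem hlt,
          pv_join_append_singleton,
          if_neg (by simp [List.take_eq_nil_iff, pv_parts_ne s])]
        simp
      rcases Nat.lt_or_ge j1 j2' with h | h
      · exact Nat.lt_trans (ih (by omega) j1 h) hstep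
      · have : j1 = j2' := by omega
        subst this
        exact hstep
  apply (List.nodup_map_iff_inj_on List.nodup_range).mpr
  intro j1 h1 j2 h2 heq
  simp only [List.mem_range] at h1 h2
  by_contra hne
  have hlen := congrArg (fun t : String => t.toList.length) heq
  simp only [pv_joinC_take] at hlen
  rcases Nat.lt_or_ge j1 j2 with h | h
  · exact absurd hlen (Nat.ne_of_lt (key j2 h2 j1 h))
  · have : j2 < j1 := by omega
    exact absurd hlen.symm (Nat.ne_of_lt (key j1 h1 j2 this))

def pvGather (k : String) (gs : List (String × List String)) : List String :=
  (gs.filter (pvMatch k)).flatMap Prod.snd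

def pvKeys (gs : List (String × List String)) : List String :=
  gs.foldl (fun K p => PySem.Set.update K (pvPrefixes p.1)) []

lemma pv_gather_snoc (k : String) (gs : List (String × List String)) (p : String × List String) :
    pvGather k (gs ++ [p]) = pvGather k gs ++ (if k ∈ pvPrefixes p.1 then p.2 else []) := by
  unfold pvGather
  rw [List.filter_append, List.flatMap_append]
  by_cases h : pvMatch k p = true
  · rw [if_pos ((pv_match_iff k p).mp h)]
    simp [h]
  · rw [if_neg (fun hm => h ((pv_match_iff k p).mpr hm))]
    simp [h]

lemma pv_gather_cons (k : String) (p : String × List String) (gs : List (String × List String)) :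
    pvGather k (p :: gs) = (if pvMatch k p then p.2 else []) ++ pvGather k gs := by
  unfold pvGather
  rw [List.filter_cons]
  by_cases h : pvMatch k p = true <;> simp [h]

lemma pv_keys_snoc (gs : List (String × List String)) (p : String × List String) :
    pvKeys (gs ++ [p]) = PySem.Set.update (pvKeys gs) (pvPrefixes p.1) := by
  unfold pvKeys
  rw [List.foldl_append]
  rfl

lemma pv_mem_keys_aux (x : String) :
    ∀ (gs : List (String × List String)) (K : List String),
      x ∈ gs.foldl (fun K p => PySem.Set.update K (pvPrefixes p.1)) K
        ↔ x ∈ K ∨ ∃ q ∈ gs, x ∈ pvPrefixes q.1 := by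
  intro gs
  induction gs with
  | nil => simp
  | cons p gs' ih =>
    intro K
    rw [List.foldl_cons, ih, PySem.Set.mem_update]
    constructor
    · rintro (⟨h | h⟩ | ⟨q, hq, hx⟩)
      · exact Or.inl h
      · exact Or.inr ⟨p, by simp, h⟩
      · exact Or.inr ⟨q, by simp [hq], hx⟩
    · rintro (h | ⟨q, hq, hx⟩)
      · exact Or.inl (Or.inl h)
      · rcases List.mem_cons.mp hq with rfl | hq'
        · exact Or.inl (Or.inr hx)
        · exact Or.inr ⟨q, hq', hx⟩

lemma pv_keys_nodup (gs : List (String × List String)) : (pvKeys gs).Nodup := by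
  unfold pvKeys
  refine List.foldlRecOn (motive := fun (K : List String) => K.Nodup) gs _ List.nodup_nil
    (fun K hK p _ => PySem.Set.nodup_update _ _ hK)

lemma pv_gather_nil_of_not_mem (k : String) (gs : List (String × List String))
    (h : k ∉ pvKeys gs) : pvGather k gs = [] := by
  unfold pvGather
  rw [List.filter_eq_nil_iff.mpr, List.flatMap_nil]
  intro p hp hm
  exact h ((pv_mem_keys_aux k gs []).mpr (Or.inr ⟨p, hp, (pv_match_iff k p).mp hm⟩))

lemma pv_add_eq (s : List String) (x : String) :
    PySem.Set.add s x = if s.contains x then s else s ++ [x] := by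
  rw [PySem.Set.add_eq_ite]
  by_cases h : x ∈ s <;> simp [h]

-- extending each key of a distinct key list by v, starting from a dict in normal form
lemma pv_dict_fold (v : List String) :
    ∀ (ps K : List String) (g : String → List String), ps.Nodup → K.Nodup →
      (∀ k, k ∉ K → g k = []) →
      ps.foldl (fun d k => d.insert k (d.getD k [] ++ v))
          (PySem.Dict.mk (K.map (fun k => (k, g k))))
        = PySem.Dict.mk ((PySem.Set.update K ps).map
            (fun k => (k, g k ++ if k ∈ ps then v else []))) := by
  intro ps
  induction ps with
  | nil =>
    intro K g _ _ _
    simp [PySem.Set.update_nil]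
  | cons k0 rest ih =>
    intro K g hnd hK hg0
    have hk0nr : k0 ∉ rest := (List.nodup_cons.mp hnd).1
    have hndr : rest.Nodup := (List.nodup_cons.mp hnd).2
    rw [List.foldl_cons]
    have hkeys : (PySem.Dict.mk (K.map (fun k => (k, g k)))).keys = K := by
      simp [PySem.Dict.keys_mk, List.map_map, Function.comp_def]
    by_cases hmem : k0 ∈ K
    · have hget : (PySem.Dict.mk (K.map (fun k => (k, g k)))).getD k0 [] = g k0 := by
        refine PySem.Dict.getD_of_mem_items _ ?_ (by rw [hkeys]; exact hK) []
        exact List.mem_map_of_mem (f := fun k => (k, g k)) hmem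
      have hcont : (PySem.Dict.mk (K.map (fun k => (k, g k)))).contains k0 = true := by
        rw [PySem.Dict.contains_eq_decide_mem_keys, hkeys]; simpa using hmem
      have hins : (PySem.Dict.mk (K.map (fun k => (k, g k)))).insert k0 (g k0 ++ v)
          = PySem.Dict.mk (K.map (fun k => (k, (fun j => if j = k0 then g k0 ++ v else g j) k))) := by
        apply PySem.Dict.ext
        rw [PySem.Dict.items_insert_of_contains _ _ hcont]
        show (K.map (fun k => (k, g k))).map _ = _
        rw [List.map_map]
        apply List.map_congr_left
        intro k _
        by_cases hk : k = k0
        · subst hk; simp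
        · simp [hk]
      rw [hget, hins, ih K _ hndr hK
        (fun k hk => by rw [if_neg (fun he => hk (by rw [he]; exact hmem))]; exact hg0 k hk)]
      rw [PySem.Set.update_cons, PySem.Set.add_of_mem hmem]
      congr 1
      apply List.map_congr_left
      intro k hk
      by_cases hkk : k = k0
      · subst hkk
        simp [hk0nr]
      · simp [hkk]
    · have hget : (PySem.Dict.mk (K.map (fun k => (k, g k)))).getD k0 [] = [] := by
        apply PySem.Dict.getD_of_not_contains
        rw [PySem.Dict.contains_eq_decide_mem_keys, hkeys]; simpa using hmem
      have hcont : (PySem.Dict.mk (K.map (fun k => (k, g k)))).contains k0 = false := by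
        rw [PySem.Dict.contains_eq_decide_mem_keys, hkeys]; simpa using hmem
      have hins : (PySem.Dict.mk (K.map (fun k => (k, g k)))).insert k0 ([] ++ v)
          = PySem.Dict.mk ((K ++ [k0]).map (fun k => (k, (fun j => if j = k0 then v else g j) k))) := by
        apply PySem.Dict.ext
        rw [PySem.Dict.items_insert_of_not_contains _ _ (by simp [hcont])]
        show K.map (fun k => (k, g k)) ++ [(k0, [] ++ v)] = _
        rw [List.map_append]
        congr 1
        · apply List.map_congr_left
          intro k hk
          have hne : k ≠ k0 := fun he => hmem (he ▸ hk)
          simp [hne]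
        · simp
      have hKnd : (K ++ [k0]).Nodup := by
        simp [List.nodup_append, hK]
        exact fun a ha he => hmem (he ▸ ha)
      rw [hget, hins, ih (K ++ [k0]) _ hndr hKnd
        (fun k hk => by
          simp only [List.mem_append, List.mem_singleton, not_or] at hk
          rw [if_neg hk.2]; exact hg0 k hk.1)]
      rw [PySem.Set.update_cons, PySem.Set.add_of_not_mem hmem]
      congr 1
      apply List.map_congr_left
      intro k hk
      by_cases hkk : k = k0
      · subst hkk
        simp [hk0nr, hg0 _ hmem]
      · simp [hkk]

-- A's in-place dedup pass over its keys rewrites every stored value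
lemma pv_step_all (f : List String → List String) :
    ∀ (l done : List (String × List String)), ((done ++ l).map Prod.fst).Nodup →
      ((l.map Prod.fst).foldl
          (fun (m : PySem.Dict String (List String)) k => m.insert k (f (m.getD k [])))
          (PySem.Dict.mk (done ++ l))).items
        = done ++ l.map (fun p => (p.1, f p.2)) := by
  intro l
  induction l with
  | nil => intro done h; simp
  | cons p rest ih =>
    obtain ⟨k, v⟩ := p
    intro done h
    have hk_done : k ∉ done.map Prod.fst := by
      intro hmem
      rw [List.map_append] at h
      exact (List.disjoint_of_nodup_append h) hmem (by simp)
    have hk_rest : k ∉ rest.map Prod.fst := by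
      rw [List.map_append] at h
      have := (List.nodup_append.mp h).2.1
      simp at this ⊢
      intro x hx
      exact this.1 x hx
    have hnd : (PySem.Dict.mk (done ++ (k, v) :: rest)).keys.Nodup := by
      simpa [PySem.Dict.keys_mk] using h
    have hget : (PySem.Dict.mk (done ++ (k, v) :: rest)).getD k [] = v :=
      PySem.Dict.getD_of_mem_items _ (by simp) hnd []
    have hcont : (PySem.Dict.mk (done ++ (k, v) :: rest)).contains k = true := by
      simp [PySem.Dict.contains_mk]
    have hins : (PySem.Dict.mk (done ++ (k, v) :: rest)).insert k (f v)
        = PySem.Dict.mk (done ++ (k, f v) :: rest) := by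
      apply PySem.Dict.ext
      rw [PySem.Dict.items_insert_of_contains _ _ hcont]
      show (done ++ (k, v) :: rest).map _ = _
      rw [List.map_append, List.map_cons]
      congr 1
      · refine (List.map_congr_left fun q hq => ?_).trans (List.map_id done)
        exact if_neg (by simp; rintro rfl; exact hk_done (List.mem_map_of_mem hq))
      · congr 1
        · simp
        · refine (List.map_congr_left fun q hq => ?_).trans (List.map_id rest)
          exact if_neg (by simp; rintro rfl; exact hk_rest (List.mem_map_of_mem hq))
    simp only [List.map_cons, List.foldl_cons, hget, hins]
    have h' : (((done ++ [(k, f v)]) ++ rest).map Prod.fst).Nodup := by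
      simpa using h
    have := ih (done ++ [(k, f v)]) h'
    simpa using this

-- the pyRange/slice enumeration of both ports IS pvPrefixes
lemma pv_prefixes_eq (s : String) :
    (PySem.List.pyRange 1 (((pvParts s).length : Int) + 1) 1).map
      (fun i => PySem.Str.join "_" (PySem.List.slice (pvParts s) none (some i))) = pvPrefixes s := by
  have hb : ((((pvParts s).length : Int) + 1) - 1).toNat = (pvParts s).length := by simp
  rw [PySem.List.pyRange_one, hb, List.map_map]
  unfold pvPrefixes
  apply List.map_congr_left
  intro j hj
  show PySem.Str.join "_" (PySem.List.slice (pvParts s) none (some (1 + (j : Int)))) = _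
  rw [PySem.List.slice_to _ (by omega),
    show (1 + (j : Int)).toNat = j + 1 from by omega]

-- A's per-group update (parent prefixes, then the full path) is a fold over pvPrefixes
lemma pv_groupA_step (d : PySem.Dict String (List String)) (p : String × List String) :
    ((PySem.List.pyRange 1 (((pvParts p.1).length : Int)) 1).foldl
        (fun merged i =>
          merged.insert (PySem.Str.join "_" (PySem.List.slice (pvParts p.1) none (some i)))
            (merged.getD (PySem.Str.join "_" (PySem.List.slice (pvParts p.1) none (some i))) [] ++ p.2))
        d).insert p.1
      (((PySem.List.pyRange 1 (((pvParts p.1).length : Int)) 1).foldl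
        (fun merged i =>
          merged.insert (PySem.Str.join "_" (PySem.List.slice (pvParts p.1) none (some i)))
            (merged.getD (PySem.Str.join "_" (PySem.List.slice (pvParts p.1) none (some i))) [] ++ p.2))
        d).getD p.1 [] ++ p.2)
    = (pvPrefixes p.1).foldl (fun d k => d.insert k (d.getD k [] ++ p.2)) d := by
  have hne : (pvParts p.1).length ≠ 0 := by
    simpa [List.length_eq_zero_iff] using pv_parts_ne p.1
  have hn : 1 ≤ ((pvParts p.1).length : Int) := by omega
  have hkey : PySem.Str.join "_"
      (PySem.List.slice (pvParts p.1) none (some ((pvParts p.1).length : Int))) = p.1 := by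
    rw [PySem.List.slice_to _ (by omega)]
    simp [pv_join_parts]
  rw [← pv_prefixes_eq, List.foldl_map, PySem.List.pyRange_one_succ_right hn, List.foldl_append]
  simp only [List.foldl_cons, List.foldl_nil]
  rw [hkey]

-- B's per-group key loop is Set.update with pvPrefixes
lemma pv_groupB_step (K : List String) (p : String × List String) :
    (PySem.List.pyRange 1 (((pvParts p.1).length : Int) + 1) 1).foldl
      (fun keys i =>
        if keys.contains (PySem.Str.join "_" (PySem.List.slice (pvParts p.1) none (some i)))
        then keys
        else keys ++ [PySem.Str.join "_" (PySem.List.slice (pvParts p.1) none (some i))])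
      K
    = PySem.Set.update K (pvPrefixes p.1) := by
  rw [← pv_prefixes_eq, PySem.Set.update_map_eq_foldl_add]
  simp only [pv_add_eq]

-- B's gather loop for one key collects the deduplicated pvGather
lemma pv_valsB (k : String) :
    ∀ (gs : List (String × List String)) (acc : List String),
      gs.foldl
        (fun vals p =>
          if pvMatch k p then
            p.2.foldl (fun vals ident => if vals.contains ident then vals else vals ++ [ident]) vals
          else vals)
        acc
      = PySem.Set.update acc (pvGather k gs) := by
  intro gs
  induction gs with
  | nil => intro acc; simp [pvGather, PySem.Set.update_nil]
  | cons p gs' ih =>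
    intro acc
    rw [List.foldl_cons, pv_gather_cons, PySem.Set.update_append]
    by_cases h : pvMatch k p = true
    · rw [if_pos h, if_pos h, ih]
      congr 1
    · rw [if_neg h, if_neg h, ih, PySem.Set.update_nil]

-- A's accumulation dict in closed form: keys in first-seen order, values = gathered idents
lemma pv_stateA (gs : List (String × List String)) :
    gs.foldl
      (fun merged p =>
        ((PySem.List.pyRange 1 (((pvParts p.1).length : Int)) 1).foldl
            (fun merged i =>
              merged.insert (PySem.Str.join "_" (PySem.List.slice (pvParts p.1) none (some i)))
                (merged.getD (PySem.Str.join "_" (PySem.List.slice (pvParts p.1) none (some i))) [] ++ p.2))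
            merged).insert p.1
          (((PySem.List.pyRange 1 (((pvParts p.1).length : Int)) 1).foldl
            (fun merged i =>
              merged.insert (PySem.Str.join "_" (PySem.List.slice (pvParts p.1) none (some i)))
                (merged.getD (PySem.Str.join "_" (PySem.List.slice (pvParts p.1) none (some i))) [] ++ p.2))
            merged).getD p.1 [] ++ p.2))
      PySem.Dict.empty
    = PySem.Dict.mk ((pvKeys gs).map (fun k => (k, pvGather k gs))) := by
  induction gs using List.reverseRecOn with
  | nil => rfl
  | append_singleton gs p ih =>
    rw [List.foldl_append]
    simp only [List.foldl_cons, List.foldl_nil]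
    rw [ih, pv_groupA_step,
      pv_dict_fold p.2 (pvPrefixes p.1) (pvKeys gs) (fun k => pvGather k gs)
        (pv_prefixes_nodup p.1) (pv_keys_nodup gs)
        (fun k hk => pv_gather_nil_of_not_mem k gs hk),
      pv_keys_snoc]
    congr 1
    apply List.map_congr_left
    intro k _
    rw [pv_gather_snoc]


-- ===== VERDICT (by name: the statement is the Claim_ definition above) =====
theorem build_parent_groups_spec : Claim_equal_build_parent_groups := by
  intro groups _
  show build_parent_groups groups = build_parent_groups_alt groups
  have hA : build_parent_groups groups
      = ((pvKeys groups).map (fun k => (k, pvGather k groups))).map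
          (fun p => (p.1, PySem.List.dedup p.2)) := by
    show ((groups.foldl
        (fun merged p =>
          ((PySem.List.pyRange 1 (((pvParts p.1).length : Int)) 1).foldl
              (fun merged i =>
                merged.insert (PySem.Str.join "_" (PySem.List.slice (pvParts p.1) none (some i)))
                  (merged.getD (PySem.Str.join "_" (PySem.List.slice (pvParts p.1) none (some i))) [] ++ p.2))
              merged).insert p.1
            (((PySem.List.pyRange 1 (((pvParts p.1).length : Int)) 1).foldl
              (fun merged i =>
                merged.insert (PySem.Str.join "_" (PySem.List.slice (pvParts p.1) none (some i)))
                  (merged.getD (PySem.Str.join "_" (PySem.List.slice (pvParts p.1) none (some i))) [] ++ p.2))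
              merged).getD p.1 [] ++ p.2))
        PySem.Dict.empty).keys.foldl
          (fun m key => m.insert key (PySem.List.dedup (m.getD key [])))
          (groups.foldl
            (fun merged p =>
              ((PySem.List.pyRange 1 (((pvParts p.1).length : Int)) 1).foldl
                  (fun merged i =>
                    merged.insert (PySem.Str.join "_" (PySem.List.slice (pvParts p.1) none (some i)))
                      (merged.getD (PySem.Str.join "_" (PySem.List.slice (pvParts p.1) none (some i))) [] ++ p.2))
                  merged).insert p.1
                (((PySem.List.pyRange 1 (((pvParts p.1).length : Int)) 1).foldl
                  (fun merged i =>
                    merged.insert (PySem.Str.join "_" (PySem.List.slice (pvParts p.1) none (some i)))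
                      (merged.getD (PySem.Str.join "_" (PySem.List.slice (pvParts p.1) none (some i))) [] ++ p.2))
                  merged).getD p.1 [] ++ p.2))
            PySem.Dict.empty)).items = _
    rw [pv_stateA]
    have hnd : (([] ++ (pvKeys groups).map (fun k => (k, pvGather k groups))).map Prod.fst).Nodup := by
      simpa [List.map_map, Function.comp_def] using pv_keys_nodup groups
    have h := pv_step_all PySem.List.dedup
      ((pvKeys groups).map (fun k => (k, pvGather k groups))) [] hnd
    simpa using h
  have hB : build_parent_groups_alt groups
      = (pvKeys groups).map (fun k => (k, PySem.Set.update [] (pvGather k groups))) := by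
    show (groups.foldl
        (fun keys p =>
          (PySem.List.pyRange 1 (((pvParts p.1).length : Int) + 1) 1).foldl
            (fun keys i =>
              if keys.contains (PySem.Str.join "_" (PySem.List.slice (pvParts p.1) none (some i)))
              then keys
              else keys ++ [PySem.Str.join "_" (PySem.List.slice (pvParts p.1) none (some i))])
            keys)
        []).map (fun k =>
          (k,
            groups.foldl
              (fun vals p =>
                if pvMatch k p then
                  p.2.foldl (fun vals ident => if vals.contains ident then vals else vals ++ [ident]) vals
                else vals)
              [])) = _
    have hk : groups.foldl
        (fun keys p =>
          (PySem.List.pyRange 1 (((pvParts p.1).length : Int) + 1) 1).foldl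
            (fun keys i =>
              if keys.contains (PySem.Str.join "_" (PySem.List.slice (pvParts p.1) none (some i)))
              then keys
              else keys ++ [PySem.Str.join "_" (PySem.List.slice (pvParts p.1) none (some i))])
            keys)
        [] = pvKeys groups := by
      unfold pvKeys
      congr 1
      funext K p
      exact pv_groupB_step K p
    rw [hk]
    apply List.map_congr_left
    intro k _
    rw [pv_valsB]
  rw [hA, hB, List.map_map]
  apply List.map_congr_left
  intro k _
  show (k, PySem.List.dedup (pvGather k groups)) = (k, PySem.Set.update [] (pvGather k groups))
  rw [PySem.Set.update_nil_left, PySem.List.dedup_eq_ofList]
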